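-- pv_equiv track=rewrite | github.com/boris-kz/CogAlg | frame_x_blobs.py | lateral_comp
-- ===== SOURCE A (Python) =====
-- from collections import deque
--
-- def lateral_comp(pixel_):
--     # Comparison over x coordinate, within rng of consecutive pixels on each line
--
--     ders1_ = []  # tuples of complete 1D derivatives: summation range = rng
--     rng_ders1_ = deque(maxlen=rng)  # incomplete ders1s, within rng from input pixel: summation range < rng
--     rng_ders1_.append((0, 0, 0))
--     max_index = rng - 1  # max index of rng_ders1_
--
--     for x, p in enumerate(pixel_):  # pixel p is compared to rng of prior pixels within horizontal line, summing d and m per prior pixel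
--         back_fd, back_fm = 0, 0  # fuzzy derivatives from rng of backward comps per pri_p
--         for index, (pri_p, fd, fm) in enumerate(rng_ders1_):
--             d = p - pri_p
--             m = ave - abs(d)
--             fd += d  # bilateral fuzzy d: running sum of differences between pri_p and all prior and subsequent pixels within rng
--             fm += m  # bilateral fuzzy m: running sum of matches between pri_p and all prior and subsequent pixels within rng
--             back_fd += d  # running sum of d between p and all prior pixels within rng
--             back_fm += m  # running sum of m between p and all prior pixels within rng
--
--             if index < max_index:
--                 rng_ders1_[index] = (pri_p, fd, fm)
--             elif x > rng * 2 - 1:  # after pri_p comp over full bilateral rng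
--                 ders1_.append((pri_p, fd, fm))  # completed bilateral tuple is transferred from rng_ders_ to ders_
--
--         rng_ders1_.appendleft((p, back_fd, back_fm))  # new tuple with initialized d and m, maxlen displaces completed tuple
--     # last incomplete rng_ders1_ in line are discarded, vs. ders1_ += reversed(rng_ders1_)
--     return ders1_
--
-- rng         = 2     # number of pixels compared to each pixel in four directions
--
-- ave         = 15    # |d| value that coincides with average match: mP filter
-- ===== SOURCE B (Python) =====
-- rng = 2
-- ave = 15
--
-- def lateral_comp(pixel_):
--     # direct windowed computation: no deque, no in-place updates
--     p = list(pixel_)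
--     out = []
--     for i in range(rng, len(p) - rng):
--         fd, fm = 0, 0
--         for k in range(1, rng + 1):   # backward comps, near -> far
--             d = p[i] - p[i - k]
--             fd += d
--             fm += ave - abs(d)
--         for k in range(1, rng + 1):   # forward comps, near -> far
--             d = p[i + k] - p[i]
--             fd += d
--             fm += ave - abs(d)
--         out.append((p[i], fd, fm))
--     return out
-- ===== Notes on version B (the rewrite author's own statement) =====
-- stated objective: simpler
-- what changed: Replaces the deque of incomplete tuples with in-place accumulator updates by a direct windowed scan: for each interior index i gather the rng backward and rng forward differences in two plain inner loops and emit the completed tuple immediately.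
import Mathlib
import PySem

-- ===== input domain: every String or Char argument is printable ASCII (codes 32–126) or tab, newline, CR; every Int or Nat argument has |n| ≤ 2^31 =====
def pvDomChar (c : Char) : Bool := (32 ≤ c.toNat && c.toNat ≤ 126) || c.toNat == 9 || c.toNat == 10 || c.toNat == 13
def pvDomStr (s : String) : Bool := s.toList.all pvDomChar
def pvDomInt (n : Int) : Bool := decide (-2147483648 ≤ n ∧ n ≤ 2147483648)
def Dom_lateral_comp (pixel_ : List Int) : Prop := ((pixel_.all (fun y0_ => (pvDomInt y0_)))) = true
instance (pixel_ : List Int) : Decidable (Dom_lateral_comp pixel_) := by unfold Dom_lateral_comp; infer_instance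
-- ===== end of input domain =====

-- B drops A's deque of incomplete tuples for a direct windowed scan per index (objective: simpler); return values are identical.

-- ===== PORT A =====
-- inner loop over enumerate(rng_ders1_): returns (updated deque, tuples appended to ders1_, back_fd, back_fm);
-- index < max_index (= rng-1 = 1) updates the deque in place, the last element is either emitted (x > rng*2-1) or left to be displaced.
def lcInner (x : Nat) (p : Int) : Nat → List (Int × Int × Int) →
    List (Int × Int × Int) × List (Int × Int × Int) × Int × Int
  | _, [] => ([], [], 0, 0)
  | index, (pri_p, fd, fm) :: rest =>
      let d := p - pri_p
      let m := (15 : Int) - |d|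
      let r := lcInner x p (index + 1) rest
      if index < 2 - 1 then
        ((pri_p, fd + d, fm + m) :: r.1, r.2.1, r.2.2.1 + d, r.2.2.2 + m)
      else if x > 2 * 2 - 1 then
        ((pri_p, fd, fm) :: r.1, (pri_p, fd + d, fm + m) :: r.2.1, r.2.2.1 + d, r.2.2.2 + m)
      else
        ((pri_p, fd, fm) :: r.1, r.2.1, r.2.2.1 + d, r.2.2.2 + m)

-- outer loop over enumerate(pixel_); appendleft on a maxlen=rng deque = cons then take rng
def lcOuter : List Int → Nat → List (Int × Int × Int) → List (Int × Int × Int) →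
    List (Int × Int × Int)
  | [], _, _, ders => ders
  | p :: rest, x, deq, ders =>
      let r := lcInner x p 0 deq
      lcOuter rest (x + 1) (((p, r.2.2.1, r.2.2.2) :: r.1).take 2) (ders ++ r.2.1)

def lateral_comp (pixel_ : List Int) : List (Int × Int × Int) :=
  lcOuter pixel_ 0 [(0, 0, 0)] []

-- ===== PORT B =====
-- transliteration of Source B: for i in range(rng, len-rng), two inner loops over k in range(1, rng+1)
def lateral_comp_alt (pixel_ : List Int) : List (Int × Int × Int) :=
  (List.range' 2 (pixel_.length - 2 * 2)).map (fun i =>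
    let g := fun j => pixel_.getD j 0   -- all indices used are in range, so getD is exact here
    let s1 := (List.range' 1 2).foldl (fun (s : Int × Int) k =>
      let d := g i - g (i - k); (s.1 + d, s.2 + ((15 : Int) - |d|))) (0, 0)
    let s2 := (List.range' 1 2).foldl (fun (s : Int × Int) k =>
      let d := g (i + k) - g i; (s.1 + d, s.2 + ((15 : Int) - |d|))) s1
    (g i, s2.1, s2.2))

-- ===== PRECONDITION & SPEC =====
def Spec_lateral_comp (pixel_ : List Int) (out : List (Int × Int × Int)) : Prop := out = lateral_comp_alt pixel_
instance (pixel_ : List Int) (out : List (Int × Int × Int)) : Decidable (Spec_lateral_comp pixel_ out) := by unfold Spec_lateral_comp; infer_instance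

-- ===== CLAIM (what is proved, stated in full; the proofs are below) =====
def Claim_equal_lateral_comp : Prop := ∀ (pixel_ : List Int), Dom_lateral_comp pixel_ → Spec_lateral_comp pixel_ (lateral_comp pixel_)

-- ===== LEMMAS AND PROOFS =====

-- steady-state recursion: deque [(a,fd1,fm1),(b,fd2,fm2)]; each pixel completes b's tuple and rolls the window
def lcDir : List Int → Int → Int → Int → Int → Int → Int → List (Int × Int × Int)
  | [], _, _, _, _, _, _ => []
  | p :: rest, a, b, fd1, fm1, fd2, fm2 =>
      (b, fd2 + (p - b), fm2 + ((15 : Int) - |p - b|)) ::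
        lcDir rest p a ((0 + (p - b)) + (p - a)) ((0 + ((15:Int) - |p - b|)) + ((15:Int) - |p - a|))
          (fd1 + (p - a)) (fm1 + ((15:Int) - |p - a|))

-- structural five-pixel-window recursion, sums written exactly as B's folds produce them
def lcWin : List Int → List (Int × Int × Int)
  | p0 :: p1 :: p2 :: p3 :: p4 :: rest =>
      (p2, (((0 + (p2 - p1)) + (p2 - p0)) + (p3 - p2)) + (p4 - p2),
           (((0 + ((15:Int) - |p2 - p1|)) + ((15:Int) - |p2 - p0|)) + ((15:Int) - |p3 - p2|)) + ((15:Int) - |p4 - p2|))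
        :: lcWin (p1 :: p2 :: p3 :: p4 :: rest)
  | _ => []

theorem lcInner_one (x : Nat) (p a fd fm : Int) :
    lcInner x p 0 [(a, fd, fm)] =
      ([(a, fd + (p - a), fm + ((15:Int) - |p - a|))], [], 0 + (p - a), 0 + ((15:Int) - |p - a|)) := by
  simp [lcInner]

theorem lcInner_eval (x : Nat) (p a b fd1 fm1 fd2 fm2 : Int) :
    lcInner x p 0 [(a, fd1, fm1), (b, fd2, fm2)] =
      ([(a, fd1 + (p - a), fm1 + ((15:Int) - |p - a|)), (b, fd2, fm2)],
       (if 3 < x then [(b, fd2 + (p - b), fm2 + ((15:Int) - |p - b|))] else []),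
       (0 + (p - b)) + (p - a), (0 + ((15:Int) - |p - b|)) + ((15:Int) - |p - a|)) := by
  by_cases hx : 3 < x <;> simp [lcInner, hx]

theorem lcOuter_dir (rest : List Int) : ∀ (x : Nat), 4 ≤ x →
    ∀ (a b fd1 fm1 fd2 fm2 : Int) (ders : List (Int × Int × Int)),
    lcOuter rest x [(a, fd1, fm1), (b, fd2, fm2)] ders =
      ders ++ lcDir rest a b fd1 fm1 fd2 fm2 := by
  induction rest with
  | nil => intro x hx a b fd1 fm1 fd2 fm2 ders; simp [lcOuter, lcDir]
  | cons p rest ih =>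
      intro x hx a b fd1 fm1 fd2 fm2 ders
      simp only [lcOuter, lcInner_eval, if_pos (show 3 < x by omega)]
      rw [show (((p, (0 + (p - b)) + (p - a), (0 + ((15:Int) - |p - b|)) + ((15:Int) - |p - a|)) ::
            [(a, fd1 + (p - a), fm1 + ((15:Int) - |p - a|)), (b, fd2, fm2)]).take 2)
          = [(p, (0 + (p - b)) + (p - a), (0 + ((15:Int) - |p - b|)) + ((15:Int) - |p - a|)),
             (a, fd1 + (p - a), fm1 + ((15:Int) - |p - a|))] from rfl]
      rw [ih (x + 1) (by omega)]
      simp [lcDir]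

theorem lcDir_win (rest : List Int) : ∀ (d c b a : Int),
    lcDir rest a b ((0 + (a - c)) + (a - b)) ((0 + ((15:Int) - |a - c|)) + ((15:Int) - |a - b|))
      (((0 + (b - d)) + (b - c)) + (a - b))
      (((0 + ((15:Int) - |b - d|)) + ((15:Int) - |b - c|)) + ((15:Int) - |a - b|)) =
    lcWin (d :: c :: b :: a :: rest) := by
  induction rest with
  | nil => intro d c b a; simp [lcDir, lcWin]
  | cons p rest ih =>
      intro d c b a
      simp only [lcDir, lcWin, List.cons.injEq, Prod.mk.injEq, true_and]
      refine ⟨⟨by ring, by ring⟩, ih c b a p⟩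

theorem lc_win (pixel_ : List Int) : lateral_comp pixel_ = lcWin pixel_ := by
  match pixel_ with
  | [] => simp [lateral_comp, lcOuter, lcWin]
  | [p0] => simp [lateral_comp, lcOuter, lcInner, lcWin]
  | [p0, p1] => simp [lateral_comp, lcOuter, lcInner, lcWin]
  | [p0, p1, p2] => simp [lateral_comp, lcOuter, lcInner, lcWin]
  | [p0, p1, p2, p3] => simp [lateral_comp, lcOuter, lcInner, lcWin]
  | p0 :: p1 :: p2 :: p3 :: rest =>
      show lcOuter (p0 :: p1 :: p2 :: p3 :: rest) 0 [(0,0,0)] [] = _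
      simp only [lcOuter]
      simp [lcInner_one, lcInner_eval, List.take]
      rw [lcOuter_dir rest 4 (by omega)]
      rw [← lcDir_win rest p0 p1 p2 p3]
      simp only [List.nil_append]
      congr 1 <;> ring

-- pointwise view of B's map body
def altF (l : List Int) (i : Nat) : Int × Int × Int :=
  (l.getD i 0,
   (((0 + (l.getD i 0 - l.getD (i - 1) 0)) + (l.getD i 0 - l.getD (i - 2) 0))
      + (l.getD (i + 1) 0 - l.getD i 0)) + (l.getD (i + 2) 0 - l.getD i 0),
   (((0 + ((15:Int) - |l.getD i 0 - l.getD (i - 1) 0|)) + ((15:Int) - |l.getD i 0 - l.getD (i - 2) 0|))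
      + ((15:Int) - |l.getD (i + 1) 0 - l.getD i 0|)) + ((15:Int) - |l.getD (i + 2) 0 - l.getD i 0|))

theorem alt_eval (l : List Int) :
    lateral_comp_alt l = (List.range' 2 (l.length - 4)).map (altF l) := by
  simp [lateral_comp_alt, altF, List.range']

theorem altF_shift (p0 : Int) (l : List Int) (j : Nat) :
    altF (p0 :: l) (j + 3) = altF l (j + 2) := by
  show altF (p0 :: l) ((j + 2) + 1) = altF l (j + 2)
  simp [altF]

theorem map_win (l : List Int) :
    (List.range' 2 (l.length - 4)).map (altF l) = lcWin l := by
  induction l with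
  | nil => simp [lcWin]
  | cons p0 rest ih =>
      match rest with
      | [] => simp [lcWin]
      | [a] => simp [lcWin]
      | [a, b] => simp [lcWin]
      | [a, b, c] => simp [lcWin]
      | p1 :: p2 :: p3 :: p4 :: rest2 =>
          have hlen : (p0 :: p1 :: p2 :: p3 :: p4 :: rest2).length - 4 = rest2.length + 1 := by
            simp
          rw [hlen, List.range'_succ, List.map_cons]
          have hlen2 : (p1 :: p2 :: p3 :: p4 :: rest2).length - 4 = rest2.length := by
            simp
          rw [show lcWin (p0 :: p1 :: p2 :: p3 :: p4 :: rest2)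
              = altF (p0 :: p1 :: p2 :: p3 :: p4 :: rest2) 2
                :: lcWin (p1 :: p2 :: p3 :: p4 :: rest2) from by
            simp [lcWin, altF]]
          rw [← ih, hlen2]
          congr 1
          rw [List.range'_eq_map_range, List.range'_eq_map_range, List.map_map, List.map_map]
          refine List.map_congr_left (fun j _ => ?_)
          show altF (p0 :: p1 :: p2 :: p3 :: p4 :: rest2) (3 + j) = altF (p1 :: p2 :: p3 :: p4 :: rest2) (2 + j)
          rw [show 3 + j = j + 3 from Nat.add_comm 3 j, show 2 + j = j + 2 from Nat.add_comm 2 j]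
          exact altF_shift p0 _ j

-- ===== VERDICT (by name: the statement is the Claim_ definition above) =====
theorem lateral_comp_spec : Claim_equal_lateral_comp := by
  intro pixel_ _
  show lateral_comp pixel_ = lateral_comp_alt pixel_
  rw [lc_win, alt_eval, map_win]
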